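-- pv_equiv track=rewrite | github.com/deecamp2019-group20/CNN_PokerNet | data/DataLoader.py | is_singleChain
-- ===== SOURCE A (Python) =====
-- def is_singleChain(card_list):
--     r""" Find whether there is a singlechain in list of cards
--
--     Args:
--         card_list: a list of card
--
--     Return:
--         index: the index of the detected chain among singleChain (start from 0)
--         Boolen: whether this card_list is a singleChain
--     """
--     cards_rank_chain = [
--         '3', '4', '5', '6', '7', '8', '9', '10',
--         'J', 'Q', 'K', 'A'
--     ]
--     if len(card_list) < 5:
--         return -1, False
--     else:
--         for i in range(0, len(card_list) - 1):
--             if (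
--                 card_list[i] in cards_rank_chain and
--                 card_list[i + 1] in cards_rank_chain and
--                 cards_rank_chain.index(card_list[i]) - 1 ==
--                     cards_rank_chain.index(card_list[i + 1])):
--                 pass
--             else:
--                 return -1, False
--         chain_start = card_list[-1]
--         chain_len = len(card_list)
--         if chain_len == 5:
--             index = cards_rank_chain.index(chain_start)
--         elif chain_len == 6:
--             index = cards_rank_chain.index(chain_start) + 8
--         elif chain_len == 7:
--             index = cards_rank_chain.index(chain_start) + 15
--         elif chain_len == 8:
--             index = cards_rank_chain.index(chain_start) + 21
--         elif chain_len == 9: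
--             index = cards_rank_chain.index(chain_start) + 26
--         elif chain_len == 10:
--             index = cards_rank_chain.index(chain_start) + 30
--         elif chain_len == 11:
--             index = cards_rank_chain.index(chain_start) + 33
--         elif chain_len == 12:
--             index = cards_rank_chain.index(chain_start) + 35
--         else:
--             raise ValueError(
--                 'the simple chain could not reach length beyond 12, got {}'
--                 .format(card_list)
--             )
--         return index, True
-- ===== SOURCE B (Python) =====
-- def is_singleChain(card_list):
--     cards_rank_chain = [
--         '3', '4', '5', '6', '7', '8', '9', '10',
--         'J', 'Q', 'K', 'A'
--     ]
--     n = len(card_list)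
--     if n < 5 or n > 12:
--         return -1, False
--     # the only possible chain of length n ending at card_list[-1] is a contiguous
--     # run of ranks: build it by slicing and compare, instead of checking pairs
--     try:
--         r = cards_rank_chain.index(card_list[-1])
--     except ValueError:
--         return -1, False
--     expected = cards_rank_chain[r:r + n]
--     if card_list == expected[::-1]:
--         # closed-form offset: sum of (13 - L) for L in 5..n-1
--         return r + (n - 5) * (22 - n) // 2, True
--     return -1, False
-- ===== Notes on version B (the rewrite author's own statement) =====
-- stated objective: alternative
-- what changed: B drops A's pairwise validation loop entirely: it looks up only the last card's rank r, slices the unique candidate chain cards_rank_chain[r:r+n], and compares card_list against its reversal, computing the index with the closed form r + (n-5)*(22-n)//2 instead of the if/elif table.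
import Mathlib
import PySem

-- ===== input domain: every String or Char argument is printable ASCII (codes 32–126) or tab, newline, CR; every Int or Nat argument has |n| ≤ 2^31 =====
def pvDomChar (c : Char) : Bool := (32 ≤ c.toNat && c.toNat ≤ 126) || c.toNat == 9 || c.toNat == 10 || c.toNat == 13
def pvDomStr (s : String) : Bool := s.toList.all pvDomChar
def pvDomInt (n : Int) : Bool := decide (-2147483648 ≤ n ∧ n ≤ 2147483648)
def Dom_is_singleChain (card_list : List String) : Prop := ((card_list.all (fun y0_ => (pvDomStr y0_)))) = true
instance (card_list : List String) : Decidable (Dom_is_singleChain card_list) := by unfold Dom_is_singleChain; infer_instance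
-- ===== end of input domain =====

-- B drops A's pairwise validation loop: it looks up only the last card's rank r, slices the
-- unique candidate chain cards_rank_chain[r:r+n] and compares the input against its reversal,
-- with a closed-form index instead of the if/elif table (alternative algorithm, same cost).

-- ===== PORT A =====
-- cards_rank_chain (shared constant of both Pythons)
def chainRanks : List String := ["3", "4", "5", "6", "7", "8", "9", "10", "J", "Q", "K", "A"]

-- the loop body's condition at index i (same order and short-circuit as the Python 'and' chain)
def aCond (cs : List String) (i : Int) : Bool :=
  chainRanks.contains (PySem.List.pyGetD cs i "") &&
  (chainRanks.contains (PySem.List.pyGetD cs (i + 1) "") &&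
    (((PySem.List.index? chainRanks (PySem.List.pyGetD cs i "")).getD 0 : Int) - 1 ==
      ((PySem.List.index? chainRanks (PySem.List.pyGetD cs (i + 1) "")).getD 0 : Int)))

-- 'for i in range(0, len-1): … else: return -1, False' with early return
def aLoop (cs : List String) : List Int → Bool
  | [] => true
  | i :: rest => if aCond cs i then aLoop cs rest else false

def is_singleChain (card_list : List String) : Int × Bool :=
  if card_list.length < 5 then (-1, false)
  else if aLoop card_list (PySem.List.pyRange 0 ((card_list.length : Int) - 1) 1) then
    let chain_start := PySem.List.pyGetD card_list (-1) ""
    let idx : Int := ((PySem.List.index? chainRanks chain_start).getD 0 : Nat)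
    let n := card_list.length
    if n == 5 then (idx, true)
    else if n == 6 then (idx + 8, true)
    else if n == 7 then (idx + 15, true)
    else if n == 8 then (idx + 21, true)
    else if n == 9 then (idx + 26, true)
    else if n == 10 then (idx + 30, true)
    else if n == 11 then (idx + 33, true)
    -- the final 'else: raise ValueError' is unreachable (a strictly descending chain over 12
    -- ranks has length ≤ 12) and excluded by Pre_; the value here is never claimed about
    else if n == 12 then (idx + 35, true)
    else (-1, false)
  else (-1, false)

-- ===== PORT B =====
def is_singleChain_alt (card_list : List String) : Int × Bool :=
  if (card_list.length : Int) < 5 ∨ 12 < (card_list.length : Int) then (-1, false)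
  else
    -- 'try: r = cards_rank_chain.index(card_list[-1]) except ValueError: return -1, False'
    match PySem.List.index? chainRanks (PySem.List.pyGetD card_list (-1) "") with
    | none => (-1, false)
    | some r =>
      -- expected = cards_rank_chain[r:r+n]; 'expected[::-1]' ported as .reverse
      -- (exact: PySem.List.slice?_none_none_neg_one)
      if card_list ==
          (PySem.List.slice chainRanks (some (r : Int))
            (some ((r : Int) + (card_list.length : Int)))).reverse then
        ((r : Int) + PySem.Int.floordiv
          (((card_list.length : Int) - 5) * (22 - (card_list.length : Int))) 2, true)
      else (-1, false)

-- ===== PRECONDITION & SPEC =====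
-- a ∈ chain, b ∈ chain, and a's rank is exactly one above b's
def descStep (a b : String) : Prop :=
  a ∈ chainRanks ∧ b ∈ chainRanks ∧
    ((PySem.List.index? chainRanks a).getD 0 : Int) - 1 = ((PySem.List.index? chainRanks b).getD 0 : Int)

-- Pre_ excludes exactly the inputs on which A raises ValueError: a fully descending chain of
-- length > 12.  No such input exists (only 12 ranks), so nothing A returns on is excluded.
def Pre_is_singleChain (card_list : List String) : Prop :=
  card_list.length ≤ 12 ∨ ¬ List.IsChain descStep card_list

instance (card_list : List String) : Decidable (Pre_is_singleChain card_list) := by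
  unfold Pre_is_singleChain descStep; infer_instance

def pvWitness_is_singleChain : List String := ["7", "6", "5", "4", "3"]

def Spec_is_singleChain (card_list : List String) (out : Int × Bool) : Prop := out = is_singleChain_alt card_list
instance (card_list : List String) (out : Int × Bool) : Decidable (Spec_is_singleChain card_list out) := by unfold Spec_is_singleChain; infer_instance

-- ===== CLAIM (what is proved, stated in full; the proofs are below) =====
def Claim_equal_is_singleChain : Prop := ∀ (card_list : List String), Dom_is_singleChain card_list → Pre_is_singleChain card_list → Spec_is_singleChain card_list (is_singleChain card_list)

-- ===== LEMMAS AND PROOFS =====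

-- the clean adjacent-pair predicate A's loop computes
def pairOK (a b : String) : Bool :=
  chainRanks.contains a &&
  (chainRanks.contains b &&
    (((PySem.List.index? chainRanks a).getD 0 : Int) - 1 ==
      ((PySem.List.index? chainRanks b).getD 0 : Int)))

def chainOK : List String → Bool
  | a :: b :: rest => pairOK a b && chainOK (b :: rest)
  | _ => true

theorem pairOK_iff (a b : String) : pairOK a b = true ↔ descStep a b := by
  simp [pairOK, descStep]

theorem chainOK_iff_isChain (cs : List String) : chainOK cs = true ↔ List.IsChain descStep cs := by
  match cs with
  | [] => simp [chainOK]
  | [a] => simp [chainOK]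
  | a :: b :: rest =>
    rw [List.isChain_cons_cons, ← chainOK_iff_isChain (b :: rest), ← pairOK_iff]
    simp [chainOK]

theorem chainOK_short (cs : List String) (h : cs.length ≤ 1) : chainOK cs = true := by
  match cs with
  | [] => rfl
  | [a] => rfl
  | a :: b :: t => simp at h

-- A's loop from index k onward is the pair check on the suffix
theorem aLoop_eq_chainOK (cs : List String) (k : Nat) :
    aLoop cs (PySem.List.pyRange (k : Int) ((cs.length : Int) - 1) 1) = chainOK (cs.drop k) := by
  by_cases hk : cs.length ≤ k + 1
  · rw [PySem.List.pyRange_one_eq_nil (by omega)]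
    rw [chainOK_short (cs.drop k) (by simp; omega)]
    rfl
  · have hk' : k + 1 < cs.length := Nat.not_le.mp hk
    have h1 : k < cs.length := by omega
    have h2 : k + 1 < cs.length := by omega
    rw [PySem.List.pyRange_one_cons (by omega)]
    have hc : aCond cs (k : Int) = pairOK cs[k] cs[k+1] := by
      have e1 : PySem.List.pyGetD cs (k : Int) "" = cs[k] := PySem.List.pyGetD_ofNat cs k "" h1
      have e2 : PySem.List.pyGetD cs ((k : Int) + 1) "" = cs[k+1] := by
        have : ((k : Int) + 1) = ((k + 1 : Nat) : Int) := by push_cast; ring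
        rw [this]; exact PySem.List.pyGetD_ofNat cs (k+1) "" h2
      simp [aCond, pairOK, e1, e2]
    have hdk : cs.drop k = cs[k] :: cs[k+1] :: cs.drop (k+2) := by
      rw [List.drop_eq_getElem_cons h1, List.drop_eq_getElem_cons h2]
    have hdk1 : cs.drop (k+1) = cs[k+1] :: cs.drop (k+2) := List.drop_eq_getElem_cons h2
    have ih := aLoop_eq_chainOK cs (k+1)
    show (if aCond cs (k : Int) then
        aLoop cs (PySem.List.pyRange ((k : Int) + 1) ((cs.length : Int) - 1) 1) else false) = _
    have hcast : ((k : Int) + 1) = ((k + 1 : Nat) : Int) := by push_cast; ring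
    rw [hc, hcast, ih, hdk1, hdk]
    show _ = (pairOK cs[k] cs[k+1] && chainOK (cs[k+1] :: cs.drop (k+2)))
    cases pairOK cs[k] cs[k+1] <;> simp
termination_by cs.length - k

theorem chainRanks_length : chainRanks.length = 12 := by decide

-- a member's index via index? really points at it
theorem index?_chainRanks_some (x : String) (r : Nat)
    (h : PySem.List.index? chainRanks x = some r) :
    r < 12 ∧ chainRanks.getD r "" = x := by
  obtain ⟨hk, hx, -⟩ := PySem.List.getElem_of_index?_eq_some h
  refine ⟨by simpa [chainRanks_length] using hk, ?_⟩
  rw [List.getD_eq_getElem _ _ hk, hx]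

-- and conversely, chainRanks being duplicate-free
theorem index?_chainRanks_getD (r : Nat) (hr : r < 12) :
    PySem.List.index? chainRanks (chainRanks.getD r "") = some r := by
  interval_cases r <;> decide

theorem drop_chainRanks_cons (r : Nat) (hr : r < 12) :
    chainRanks.drop r = chainRanks.getD r "" :: chainRanks.drop (r + 1) := by
  have hrlt : r < chainRanks.length := by rw [chainRanks_length]; exact hr
  rw [List.drop_eq_getElem_cons hrlt, List.getD_eq_getElem _ _ hrlt]

-- an ascending-by-one run starting at a card of rank r is exactly the slice of the rank table
theorem asc_char (t : List String) : ∀ (x : String) (r : Nat),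
    PySem.List.index? chainRanks x = some r →
    (List.IsChain (fun a b => descStep b a) (x :: t) ↔
      x :: t = (chainRanks.drop r).take (t.length + 1)) := by
  induction t with
  | nil =>
    intro x r hx
    obtain ⟨hr, hxe⟩ := index?_chainRanks_some x r hx
    rw [drop_chainRanks_cons r hr]
    simp only [List.length_nil, Nat.zero_add, List.take_succ_cons, List.take_zero]
    exact ⟨fun _ => by rw [hxe], fun _ => .singleton _⟩
  | cons y t' ih =>
    intro x r hx
    obtain ⟨hr, hxe⟩ := index?_chainRanks_some x r hx
    rw [List.isChain_cons_cons]
    have hsplit : (x :: y :: t' = (chainRanks.drop r).take ((y :: t').length + 1)) ↔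
        (x = chainRanks.getD r "" ∧ y :: t' = (chainRanks.drop (r + 1)).take (t'.length + 1)) := by
      rw [drop_chainRanks_cons r hr]
      simp [List.take_succ_cons, List.cons.injEq]
    rw [hsplit]
    constructor
    · rintro ⟨⟨hym, hxm, hidx⟩, hch⟩
      have hsome : (PySem.List.index? chainRanks y).isSome :=
        (PySem.List.index?_isSome_iff _ _).mpr hym
      obtain ⟨ry, hry⟩ := Option.isSome_iff_exists.mp hsome
      have hryv : ry = r + 1 := by
        rw [hry, hx] at hidx
        simp at hidx
        omega
      subst hryv
      exact ⟨hxe.symm, (ih y (r + 1) hry).mp hch⟩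
    · rintro ⟨hx1, htail⟩
      -- the tail is nonempty, so r + 1 < 12 and y is the card of rank r + 1
      have hr1 : r + 1 < 12 := by
        by_contra hn
        have hnil : chainRanks.drop (r + 1) = [] :=
          List.drop_eq_nil_of_le (by rw [chainRanks_length]; omega)
        rw [hnil] at htail; simp at htail
      have hy : y = chainRanks.getD (r + 1) "" := by
        rw [drop_chainRanks_cons (r + 1) hr1, List.take_succ_cons] at htail
        have := congrArg (·.head?) htail; simpa using this
      have hiy : PySem.List.index? chainRanks y = some (r + 1) := by
        rw [hy]; exact index?_chainRanks_getD (r + 1) hr1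
      refine ⟨⟨(PySem.List.index?_isSome_iff _ _).mp (by rw [hiy]; rfl),
        (PySem.List.index?_isSome_iff _ _).mp (by rw [hx]; rfl), ?_⟩,
        (ih y (r + 1) hiy).mpr htail⟩
      rw [hx, hiy]
      simp

-- a valid chain's last card is a chain rank
theorem chainOK_last_mem : ∀ (t : List String) (a b : String),
    chainOK (a :: b :: t) = true → (a :: b :: t).getLast (by simp) ∈ chainRanks
  | [], a, b, h => by
    have : pairOK a b = true := by simpa [chainOK] using ((Bool.and_eq_true _ _).mp h).1
    have := (pairOK_iff a b).mp this
    simpa using this.2.1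
  | c :: t', a, b, h => by
    have h' : pairOK a b = true ∧ pairOK b c = true ∧ chainOK (c :: t') = true := by
      simpa [chainOK] using h
    have h2 : chainOK (b :: c :: t') = true := by simp [chainOK, h'.2.1, h'.2.2]
    simpa using chainOK_last_mem t' b c h2

-- B's closed form evaluated at each reachable length
theorem closed_eval (n : Nat) (h5 : 5 ≤ n) (h12 : n ≤ 12) :
    PySem.Int.floordiv (((n : Int) - 5) * (22 - (n : Int))) 2 =
      (if n == 5 then (0 : Int) else if n == 6 then 8 else if n == 7 then 15
       else if n == 8 then 21 else if n == 9 then 26 else if n == 10 then 30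
       else if n == 11 then 33 else 35) := by
  interval_cases n <;> decide

-- ===== VERDICT (by name: the statement is the Claim_ definition above) =====
theorem is_singleChain_spec : Claim_equal_is_singleChain := by
  intro cs _hdom hpre
  unfold Spec_is_singleChain is_singleChain is_singleChain_alt
  by_cases h5 : cs.length < 5
  · have : (cs.length : Int) < 5 := by exact_mod_cast h5
    simp [h5, this]
  · have h5' : 5 ≤ cs.length := Nat.not_lt.mp h5
    obtain ⟨a, b, t, rfl⟩ : ∃ a b t, cs = a :: b :: t := by
      match cs, h5' with
      | a :: b :: t, _ => exact ⟨a, b, t, rfl⟩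
    set cs := a :: b :: t with hcs
    have hA : aLoop cs (PySem.List.pyRange 0 ((cs.length : Int) - 1) 1) = chainOK cs := by
      simpa using aLoop_eq_chainOK cs 0
    have hne : cs ≠ [] := by simp [hcs]
    have hlast : PySem.List.pyGetD cs (-1) "" = cs.getLast hne :=
      PySem.List.pyGetD_neg_one cs "" hne
    rw [if_neg h5, hA]
    by_cases h12 : cs.length ≤ 12
    · rw [if_neg (by omega :
        ¬ ((cs.length : Int) < 5 ∨ 12 < (cs.length : Int)))]
      rw [hlast]
      cases hidx : PySem.List.index? chainRanks (cs.getLast hne) with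
      | none =>
        -- the last card is not a chain rank, so A's loop must have failed too
        have hnm : cs.getLast hne ∉ chainRanks := (PySem.List.index?_eq_none_iff _ _).mp hidx
        have hco : chainOK cs = false := by
          cases hc : chainOK cs with
          | false => rfl
          | true => exact absurd (chainOK_last_mem t a b hc) hnm
        rw [hco]; rfl
      | some r =>
        obtain ⟨l', hl'⟩ : ∃ l', cs.reverse = cs.getLast hne :: l' := by
          refine ⟨cs.reverse.tail, ?_⟩
          rw [← List.head_reverse (by simp [hcs])]
          exact (List.cons_head_tail (by simp [hcs])).symm
        have hslice : PySem.List.slice chainRanks (some (r : Int))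
            (some ((r : Int) + (cs.length : Int))) = (chainRanks.drop r).take cs.length :=
          PySem.List.slice_natCast_add chainRanks r cs.length
        have hlen' : l'.length + 1 = cs.length := by
          have := congrArg List.length hl'; simp at this; omega
        have hiff : chainOK cs = true ↔ cs = ((chainRanks.drop r).take cs.length).reverse := by
          rw [chainOK_iff_isChain, ← List.isChain_reverse, hl',
            asc_char l' (cs.getLast hne) r hidx, hlen']
          constructor
          · intro h
            rw [← h, ← hl', List.reverse_reverse]
          · intro h
            rw [← hl']
            conv_lhs => rw [h, List.reverse_reverse]
        dsimp only
        rw [hslice]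
        simp only [beq_iff_eq]
        cases hc : chainOK cs with
        | false =>
          have hnotb : ¬ (cs = (List.take cs.length (List.drop r chainRanks)).reverse) := by
            intro h
            have h2 := hiff.mpr h
            rw [h2] at hc
            cases hc
          rw [if_neg hnotb]
          simp
        | true =>
          rw [if_pos (hiff.mp hc)]
          have hgd : ((PySem.List.index? chainRanks (cs.getLast hne)).getD 0 : Nat) = r := by
            rw [hidx]; rfl
          rw [hgd, closed_eval cs.length h5' h12]
          have h5'' := h5'
          have h12' := h12
          generalize cs.length = n at h5'' h12' ⊢
          interval_cases n <;> simp
    · -- length > 12: Pre_ rules out a valid chain, so A's loop fails; B's guard fires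
      have hnc : ¬ List.IsChain descStep cs := by
        rcases hpre with h | h
        · omega
        · exact h
      have hco : chainOK cs = false := by
        cases hc : chainOK cs with
        | false => rfl
        | true => exact absurd ((chainOK_iff_isChain cs).mp hc) hnc
      rw [hco, if_pos (by omega :
        ((cs.length : Int) < 5 ∨ 12 < (cs.length : Int)))]
      simp
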